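-- pv_equiv track=rewrite | github.com/Beneficial-AI-Foundation/probe-verus | tools/python/install_z3.py | deduplicate_releases
-- ===== SOURCE A (Python) =====
-- def deduplicate_releases(releases, num_releases):
--     """
--     Deduplicate releases by tag_name, keeping the earliest published date.
--     Sort by date descending.
--     """
--     # Group by tag_name
--     groups = {}
--     for release in releases:
--         tag = release['tag_name']
--         if tag not in groups:
--             groups[tag] = []
--         groups[tag].append(release)
--
--     # For each group, take the one with earliest published_at
--     deduplicated = []
--     for tag, group in groups.items():
--         group.sort(key=lambda r: r['published_at'])
--         deduplicated.append(group[0])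
--
--     # Sort by date descending
--     deduplicated.sort(key=lambda r: r['published_at'], reverse=True)
--
--     return deduplicated[:num_releases]
-- ===== SOURCE B (Python) =====
-- def deduplicate_releases(releases, num_releases):
--     """
--     Deduplicate releases by tag_name, keeping the earliest published date.
--     Sort by date descending.
--
--     Single pass: keep a running per-tag minimum (strict '<' keeps the
--     first-seen release on date ties, like A's stable per-group sort).
--     """
--     best = {}
--     for release in releases:
--         tag = release['tag_name']
--         cur = best.get(tag)
--         if cur is None or release['published_at'] < cur['published_at']:
--             best[tag] = release
--     return sorted(best.values(), key=lambda r: r['published_at'], reverse=True)[:num_releases]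
-- ===== Notes on version B (the rewrite author's own statement) =====
-- stated objective: simpler
-- what changed: Replaces per-tag list accumulation plus a stable sort of every group (taking each group's head) by a single pass that keeps one running earliest release per tag in a dict, then sorts the surviving representatives once.
import Mathlib
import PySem

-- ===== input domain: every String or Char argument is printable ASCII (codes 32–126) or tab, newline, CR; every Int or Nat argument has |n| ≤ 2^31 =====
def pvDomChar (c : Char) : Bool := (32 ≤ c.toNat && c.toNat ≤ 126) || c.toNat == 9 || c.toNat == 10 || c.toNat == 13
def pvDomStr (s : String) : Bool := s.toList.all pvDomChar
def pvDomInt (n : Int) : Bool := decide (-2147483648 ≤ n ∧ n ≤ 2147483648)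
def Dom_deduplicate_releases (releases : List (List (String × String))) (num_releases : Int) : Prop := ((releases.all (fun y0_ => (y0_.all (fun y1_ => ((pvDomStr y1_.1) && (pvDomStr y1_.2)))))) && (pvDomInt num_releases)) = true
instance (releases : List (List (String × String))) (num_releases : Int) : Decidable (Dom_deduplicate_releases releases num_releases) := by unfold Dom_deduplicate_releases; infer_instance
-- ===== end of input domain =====

-- B replaces A's per-tag grouping + stable sort of every group by a single pass keeping a
-- running earliest release per tag; return value only (A also mutates the group lists it builds,
-- which is internal, and sorts nothing the caller can see).

-- release[k] for an assoc-list "dict": first match; a missing key (Python KeyError) is excluded by Pre_,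
-- the "" default is never reached on admitted inputs.
def pvItem (r : List (String × String)) (k : String) : String :=
  ((r.find? (fun p => p.1 == k)).map (fun p => p.2)).getD ""

-- ===== PORT A =====
def deduplicate_releases (releases : List (List (String × String))) (num_releases : Int) : List (List (String × String)) :=
  -- groups = {}; for release in releases: groups.setdefault-style append
  let groups : PySem.Dict String (List (List (String × String))) :=
    releases.foldl (fun g r =>
      let tag := pvItem r "tag_name"
      g.insert tag (g.getD tag [] ++ [r])) PySem.Dict.empty
  -- for tag, group in groups.items(): group.sort(key=published_at); deduplicated.append(group[0])
  let deduplicated : List (List (String × String)) :=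
    groups.items.foldl (fun acc p =>
      acc ++ [((PySem.List.pyGet? (PySem.List.sorted p.2 (fun r => pvItem r "published_at") false) 0).getD [])]) []
  -- deduplicated.sort(key=published_at, reverse=True); return deduplicated[:num_releases]
  PySem.List.slice (PySem.List.sorted deduplicated (fun r => pvItem r "published_at") true) none (some num_releases)

-- ===== PORT B =====
def deduplicate_releases_alt (releases : List (List (String × String))) (num_releases : Int) : List (List (String × String)) :=
  let best : PySem.Dict String (List (String × String)) :=
    releases.foldl (fun b r =>
      let tag := pvItem r "tag_name"
      match b.get? tag with
      | none => b.insert tag r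
      | some cur => if pvItem r "published_at" < pvItem cur "published_at" then b.insert tag r else b)
      PySem.Dict.empty
  PySem.List.slice (PySem.List.sorted best.values (fun r => pvItem r "published_at") true) none (some num_releases)

-- ===== PRECONDITION & SPEC =====
-- Pre_: every release carries the keys 'tag_name' and 'published_at'; on a release missing either,
-- the Python A raises KeyError (no value is returned).
def Pre_deduplicate_releases (releases : List (List (String × String))) (num_releases : Int) : Prop :=
  (releases.all (fun r => (r.any (fun p => p.1 == "tag_name")) && (r.any (fun p => p.1 == "published_at")))) = true
instance (releases : List (List (String × String))) (num_releases : Int) : Decidable (Pre_deduplicate_releases releases num_releases) := by unfold Pre_deduplicate_releases; infer_instance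

def pvWitness_deduplicate_releases : (List (List (String × String))) × Int :=
  ([[("tag_name", "v1"), ("published_at", "2024-01-02")], [("tag_name", "v1"), ("published_at", "2024-01-01")]], 5)

def Spec_deduplicate_releases (releases : List (List (String × String))) (num_releases : Int) (out : List (List (String × String))) : Prop := out = deduplicate_releases_alt releases num_releases
instance (releases : List (List (String × String))) (num_releases : Int) (out : List (List (String × String))) : Decidable (Spec_deduplicate_releases releases num_releases out) := by unfold Spec_deduplicate_releases; infer_instance

-- ===== CLAIM (what is proved, stated in full; the proofs are below) =====
def Claim_equal_deduplicate_releases : Prop := ∀ (releases : List (List (String × String))) (num_releases : Int), Dom_deduplicate_releases releases num_releases → Pre_deduplicate_releases releases num_releases → Spec_deduplicate_releases releases num_releases (deduplicate_releases releases num_releases)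

-- ===== LEMMAS AND PROOFS =====

-- abbreviations used only by the proofs
abbrev pvRel := List (String × String)
def pvKp (r : pvRel) : String := pvItem r "published_at"
-- running strict minimum by published_at (first-seen wins on ties)
def pvMinRun (a : pvRel) (l : List pvRel) : pvRel :=
  l.foldl (fun cur r => if pvKp r < pvKp cur then r else cur) a
def pvRep (g : List pvRel) : pvRel := match g with | [] => [] | a :: l => pvMinRun a l
theorem pvRep_cons (a : pvRel) (l : List pvRel) : pvRep (a :: l) = pvMinRun a l := rfl
def pvPhi (p : String × List pvRel) : String × pvRel := (p.1, pvRep p.2)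

theorem pv_insertBy_cons {α : Type} (before : α → α → Bool) (x h : α) (t : List α) :
    PySem.List.insertBy before x (h :: t) =
      if before x h then x :: h :: t else h :: PySem.List.insertBy before x t := rfl

theorem pv_headD_foldl_insertBy {α : Type} (before : α → α → Bool) (d : α) :
    ∀ (l : List α) (h : α) (t : List α),
      (l.foldl (fun acc x => PySem.List.insertBy before x acc) (h :: t)).headD d =
        l.foldl (fun cur r => if before r cur then r else cur) h := by
  intro l
  induction l with
  | nil => intro h t; rfl
  | cons x l ih =>
      intro h t
      simp only [List.foldl_cons, pv_insertBy_cons]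
      by_cases hb : before x h = true
      · simpa [hb] using ih x (h :: t)
      · simpa [hb] using ih h (PySem.List.insertBy before x t)

theorem pv_sorted_headD (a : pvRel) (l : List pvRel) :
    ((PySem.List.sorted (a :: l) pvKp false).headD []) = pvMinRun a l := by
  rw [PySem.List.sorted_eq_foldl_insertBy]
  simp only [List.foldl_cons]
  have h1 : PySem.List.insertBy (fun x y => decide (pvKp x < pvKp y)) a [] = [a] := rfl
  rw [h1, pv_headD_foldl_insertBy]
  simp [pvMinRun]

-- keys nodup → value determined by key
theorem pv_keyUnique {β : Type} :
    ∀ (l : List (String × β)), (l.map (fun p => p.1)).Nodup →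
      ∀ p ∈ l, ∀ q ∈ l, p.1 = q.1 → p.2 = q.2 := by
  intro l
  induction l with
  | nil => simp
  | cons x l ih =>
      intro hnd p hp q hq he
      simp only [List.map_cons, List.nodup_cons] at hnd
      rcases hnd with ⟨hx, hnd⟩
      rcases List.mem_cons.mp hp with hp | hp
      · rcases List.mem_cons.mp hq with hq | hq
        · rw [hp, hq]
        · exfalso
          apply hx
          rw [← hp, he]
          exact List.mem_map_of_mem hq
      · rcases List.mem_cons.mp hq with hq | hq
        · exfalso
          apply hx
          rw [← hq, ← he]
          exact List.mem_map_of_mem hp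
        · exact ih hnd p hp q hq he

def pvAstep (g : PySem.Dict String (List pvRel)) (r : pvRel) : PySem.Dict String (List pvRel) :=
  g.insert (pvItem r "tag_name") (g.getD (pvItem r "tag_name") [] ++ [r])
def pvBstep (b : PySem.Dict String pvRel) (r : pvRel) : PySem.Dict String pvRel :=
  match b.get? (pvItem r "tag_name") with
  | none => b.insert (pvItem r "tag_name") r
  | some cur => if pvItem r "published_at" < pvItem cur "published_at" then b.insert (pvItem r "tag_name") r else b

theorem pv_minRun_append (a : pvRel) (l : List pvRel) (r : pvRel) :
    pvMinRun a (l ++ [r]) =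
      if pvItem r "published_at" < pvItem (pvMinRun a l) "published_at" then r
      else pvMinRun a l := by
  simp [pvMinRun, pvKp, List.foldl_append]

theorem pv_get0 (xs : List pvRel) : (PySem.List.pyGet? xs 0).getD [] = xs.headD [] := by
  cases xs <;> simp [PySem.List.pyGet?, PySem.List.pyIdx?]

theorem pv_step (G : PySem.Dict String (List pvRel)) (B : PySem.Dict String pvRel) (r : pvRel)
    (hnd : (G.items.map (fun p => p.1)).Nodup)
    (hne : ∀ p ∈ G.items, p.2 ≠ [])
    (hB : B.items = G.items.map pvPhi) :
    (pvBstep B r).items = (pvAstep G r).items.map pvPhi ∧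
    ((pvAstep G r).items.map (fun p => p.1)).Nodup ∧
    (∀ p ∈ (pvAstep G r).items, p.2 ≠ []) := by
  have hfind : B.items.find? (fun p => p.1 == pvItem r "tag_name") =
      (G.items.find? (fun p => p.1 == pvItem r "tag_name")).map pvPhi := by
    rw [hB, List.find?_map]; rfl
  cases hf : G.items.find? (fun p => p.1 == pvItem r "tag_name") with
  | none =>
    have hBf : B.items.find? (fun p => p.1 == pvItem r "tag_name") = none := by rw [hfind, hf]; rfl
    have hcG : G.contains (pvItem r "tag_name") = false := by
      simp only [PySem.Dict.contains, List.any_eq_false]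
      exact fun p hp => List.find?_eq_none.mp hf p hp
    have hcB : B.contains (pvItem r "tag_name") = false := by
      simp only [PySem.Dict.contains, List.any_eq_false]
      exact fun p hp => List.find?_eq_none.mp hBf p hp
    have hA : (pvAstep G r).items = G.items ++ [(pvItem r "tag_name", [r])] := by
      simp [pvAstep, PySem.Dict.insert, hcG, PySem.Dict.getD, PySem.Dict.get?, hf]
    have hBg : B.get? (pvItem r "tag_name") = none := by
      simp [PySem.Dict.get?, hBf]
    refine ⟨?_, ?_, ?_⟩
    · simp only [pvBstep, hBg]
      simp [PySem.Dict.insert, hcB, hA, hB, pvPhi, pvRep, pvMinRun]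
    · rw [hA]
      simp only [List.map_append, List.map_cons, List.map_nil]
      rw [List.nodup_append]
      refine ⟨hnd, List.nodup_singleton _, ?_⟩
      intro x hx
      simp only [List.mem_singleton]
      rcases List.mem_map.mp hx with ⟨p, hp, rfl⟩
      have := List.find?_eq_none.mp hf p hp
      simpa using fun hh => this (by simp [hh])
    · rw [hA]
      intro p hp
      rcases List.mem_append.mp hp with hp | hp
      · exact hne p hp
      · simp only [List.mem_singleton] at hp
        subst hp; simp
  | some pg =>
    obtain ⟨s, g⟩ := pg
    have hst : s = pvItem r "tag_name" := by
      have := List.find?_some hf; simpa using this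
    subst hst
    have hmem := List.mem_of_find?_eq_some hf
    have hgne : g ≠ [] := hne _ hmem
    obtain ⟨a, l, rfl⟩ : ∃ a l, g = a :: l := by
      cases g with
      | nil => exact absurd rfl hgne
      | cons a l => exact ⟨a, l, rfl⟩
    have hcG : G.contains ((pvItem r "tag_name")) = true := by
      simp only [PySem.Dict.contains, List.any_eq_true]
      exact ⟨((pvItem r "tag_name"), a :: l), hmem, by simp⟩
    have hcB : B.contains ((pvItem r "tag_name")) = true := by
      simp only [PySem.Dict.contains, hB, List.any_eq_true]
      exact ⟨pvPhi ((pvItem r "tag_name"), a :: l), List.mem_map_of_mem hmem, by simp [pvPhi]⟩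
    have hgG : G.get? ((pvItem r "tag_name")) = some (a :: l) := by
      simp [PySem.Dict.get?, hf]
    have hgB : B.get? ((pvItem r "tag_name")) = some (pvMinRun a l) := by
      simp [PySem.Dict.get?, hfind, hf, pvPhi, pvRep]
    have hA : (pvAstep G r).items =
        G.items.map (fun p => if p.1 == (pvItem r "tag_name") then ((pvItem r "tag_name"), (a :: l) ++ [r]) else p) := by
      simp [pvAstep, PySem.Dict.insert, hcG, PySem.Dict.getD, hgG]
    have hkeys : ((pvAstep G r).items.map (fun p => p.1)) = G.items.map (fun p => p.1) := by
      rw [hA, List.map_map]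
      refine List.map_congr_left fun p _ => ?_
      by_cases hpt : (p.1 == (pvItem r "tag_name")) = true
      · simp [Function.comp, hpt, (beq_iff_eq.mp hpt).symm]
      · simp [Function.comp, hpt]
    have hnonempty : ∀ p ∈ (pvAstep G r).items, p.2 ≠ [] := by
      rw [hA]
      intro p hp
      rcases List.mem_map.mp hp with ⟨q, hq, rfl⟩
      by_cases hpt : (q.1 == (pvItem r "tag_name")) = true
      · simp [hpt]
      · simp only [hpt, if_neg]
        simpa [hpt] using hne q hq
    refine ⟨?_, hkeys ▸ hnd, hnonempty⟩
    simp only [pvBstep, hgB]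
    by_cases hlt : pvItem r "published_at" < pvItem (pvMinRun a l) "published_at"
    · -- strictly earlier: both overwrite in place
      simp only [hlt, if_pos]
      have : (B.insert ((pvItem r "tag_name")) r).items = B.items.map (fun p => if p.1 == (pvItem r "tag_name") then ((pvItem r "tag_name"), r) else p) := by
        simp [PySem.Dict.insert, hcB]
      rw [this, hB, hA, List.map_map, List.map_map]
      refine List.map_congr_left fun p _ => ?_
      by_cases hpt : (p.1 == (pvItem r "tag_name")) = true
      · simp only [Function.comp_apply, pvPhi, hpt, if_pos]
        rw [List.cons_append, pvRep_cons, pv_minRun_append, if_pos hlt]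
      · simp [Function.comp, pvPhi, hpt]
    · -- not earlier: B unchanged, A'(pvItem r "tag_name") overwrite is invisible through pvPhi
      simp only [hlt, if_neg, not_false_eq_true]
      rw [hB, hA, List.map_map]
      refine List.map_congr_left fun p hp => ?_
      by_cases hpt : (p.1 == (pvItem r "tag_name")) = true
      · have hp2 : p.2 = a :: l :=
          pv_keyUnique G.items hnd p hp ((pvItem r "tag_name"), a :: l) hmem (beq_iff_eq.mp hpt)
        simp only [Function.comp_apply, pvPhi, hpt, if_pos, pvRep_cons, hp2]
        rw [List.cons_append, pvRep_cons, pv_minRun_append, if_neg hlt]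
        simp [beq_iff_eq.mp hpt]
      · simp [Function.comp, pvPhi, hpt]

theorem pv_loop_inv :
    ∀ (rs : List pvRel) (G : PySem.Dict String (List pvRel)) (B : PySem.Dict String pvRel),
      (G.items.map (fun p => p.1)).Nodup →
      (∀ p ∈ G.items, p.2 ≠ []) →
      B.items = G.items.map pvPhi →
      ((rs.foldl pvBstep B).items = (rs.foldl pvAstep G).items.map pvPhi ∧
       ((rs.foldl pvAstep G).items.map (fun p => p.1)).Nodup ∧
       (∀ p ∈ (rs.foldl pvAstep G).items, p.2 ≠ [])) := by
  intro rs
  induction rs with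
  | nil => exact fun G B h1 h2 h3 => ⟨h3, h1, h2⟩
  | cons r rs ih =>
      intro G B h1 h2 h3
      obtain ⟨s1, s2, s3⟩ := pv_step G B r h1 h2 h3
      simpa using ih (pvAstep G r) (pvBstep B r) s2 s3 s1

-- acc ++ map
theorem pv_foldl_append_map {α β : Type} (f : α → β) :
    ∀ (l : List α) (acc : List β), l.foldl (fun acc x => acc ++ [f x]) acc = acc ++ l.map f := by
  intro l
  induction l with
  | nil => simp
  | cons x l ih => intro acc; simp [ih, List.append_assoc]

-- ===== VERDICT (by name: the statement is the Claim_ definition above) =====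
theorem deduplicate_releases_spec : Claim_equal_deduplicate_releases := by
  intro releases num_releases _hdom _hpre
  unfold Spec_deduplicate_releases
  simp only [deduplicate_releases, deduplicate_releases_alt]
  show PySem.List.slice
      (PySem.List.sorted
        ((releases.foldl pvAstep PySem.Dict.empty).items.foldl (fun acc p =>
          acc ++ [((PySem.List.pyGet? (PySem.List.sorted p.2
            (fun r => pvItem r "published_at") false) 0).getD [])]) [])
        (fun r => pvItem r "published_at") true) none (some num_releases) =
    PySem.List.slice
      (PySem.List.sorted ((releases.foldl pvBstep PySem.Dict.empty).values)
        (fun r => pvItem r "published_at") true) none (some num_releases)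
  obtain ⟨h1, _h2, h3⟩ := pv_loop_inv releases PySem.Dict.empty PySem.Dict.empty
    (by simp [PySem.Dict.empty]) (by simp [PySem.Dict.empty]) (by simp [PySem.Dict.empty])
  have key : ((releases.foldl pvAstep PySem.Dict.empty).items.foldl (fun acc p =>
        acc ++ [((PySem.List.pyGet? (PySem.List.sorted p.2
          (fun r => pvItem r "published_at") false) 0).getD [])]) []) =
      (releases.foldl pvBstep PySem.Dict.empty).values := by
    rw [pv_foldl_append_map]
    simp only [List.nil_append, PySem.Dict.values, h1, List.map_map]
    refine List.map_congr_left fun p hp => ?_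
    obtain ⟨a, l, hal⟩ : ∃ a l, p.2 = a :: l := by
      cases hpl : p.2 with
      | nil => exact absurd hpl (h3 p hp)
      | cons a l => exact ⟨a, l, rfl⟩
    have hk : (fun r : pvRel => pvItem r "published_at") = pvKp := rfl
    rw [hal, hk, pv_get0, pv_sorted_headD]
    simp [Function.comp, pvPhi, hal, pvRep_cons]
  rw [key]
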